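-- pv_equiv track=rewrite | github.com/gazelleryanwalker/leaddb-backend | src/services/lead_generation.py | _get_department_from_title
-- ===== SOURCE A (Python) =====
-- def _get_department_from_title(job_title: str) -> str:
--     """Determine department from job title"""
--     title_lower = job_title.lower()
--
--     if any(word in title_lower for word in ['ceo', 'president', 'founder']):
--         return 'Executive'
--     elif any(word in title_lower for word in ['cto', 'engineering', 'technical', 'developer']):
--         return 'Engineering'
--     elif any(word in title_lower for word in ['sales', 'business development']):
--         return 'Sales'
--     elif any(word in title_lower for word in ['marketing', 'growth', 'brand']):
--         return 'Marketing'
--     elif any(word in title_lower for word in ['finance', 'accounting', 'cfo']):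
--         return 'Finance'
--     else:
--         return 'Other'
-- ===== SOURCE B (Python) =====
-- # B: flatten all keywords into one keyword->priority-rank map, collect the ranks of
-- # every keyword that occurs in the lowered title, and take the minimum rank (best
-- # priority); index a department list by that rank. No sequential group checks.
-- _KEYWORD_RANK = {
--     'ceo': 0, 'president': 0, 'founder': 0,
--     'cto': 1, 'engineering': 1, 'technical': 1, 'developer': 1,
--     'sales': 2, 'business development': 2,
--     'marketing': 3, 'growth': 3, 'brand': 3,
--     'finance': 4, 'accounting': 4, 'cfo': 4,
-- }
-- _DEPARTMENTS = ['Executive', 'Engineering', 'Sales', 'Marketing', 'Finance']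
--
--
-- def _get_department_from_title(job_title: str) -> str:
--     """Determine department from job title"""
--     title_lower = job_title.lower()
--     best = min((rank for kw, rank in _KEYWORD_RANK.items() if kw in title_lower),
--                default=None)
--     return 'Other' if best is None else _DEPARTMENTS[best]
-- ===== Notes on version B (the rewrite author's own statement) =====
-- stated objective: alternative
-- what changed: Replaces the ordered if/elif group checks with a flat keyword->rank map: B collects the ranks of all matching keywords at once and returns the department at the minimum rank, instead of short-circuiting group by group.
import Mathlib
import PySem

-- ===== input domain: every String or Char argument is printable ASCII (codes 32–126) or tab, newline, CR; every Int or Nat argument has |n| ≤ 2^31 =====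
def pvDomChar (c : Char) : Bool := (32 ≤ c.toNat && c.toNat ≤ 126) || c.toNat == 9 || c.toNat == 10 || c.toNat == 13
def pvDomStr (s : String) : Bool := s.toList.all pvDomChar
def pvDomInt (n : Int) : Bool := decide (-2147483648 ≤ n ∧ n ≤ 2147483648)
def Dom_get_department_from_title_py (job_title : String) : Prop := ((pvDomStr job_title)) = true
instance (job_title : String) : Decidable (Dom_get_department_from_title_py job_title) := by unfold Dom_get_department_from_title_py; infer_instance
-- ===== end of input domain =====

-- B: flattens the keyword groups into one keyword->rank map and returns the department of the minimum matched rank, instead of A's ordered group-by-group short-circuit checks; alternative algorithm, same cost.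


-- ===== PORT A =====
def get_department_from_title_py (job_title : String) : String :=
  let title_lower := PySem.Str.lower job_title
  if (["ceo", "president", "founder"].any (fun word => PySem.Str.isIn word title_lower)) then "Executive"
  else if (["cto", "engineering", "technical", "developer"].any (fun word => PySem.Str.isIn word title_lower)) then "Engineering"
  else if (["sales", "business development"].any (fun word => PySem.Str.isIn word title_lower)) then "Sales"
  else if (["marketing", "growth", "brand"].any (fun word => PySem.Str.isIn word title_lower)) then "Marketing"
  else if (["finance", "accounting", "cfo"].any (fun word => PySem.Str.isIn word title_lower)) then "Finance"
  else "Other"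

-- ===== PORT B =====
-- _KEYWORD_RANK: flat dict keyword -> priority rank, as an association list in insertion order
def pvKeywordRank : List (String × Int) :=
  [("ceo", 0), ("president", 0), ("founder", 0),
   ("cto", 1), ("engineering", 1), ("technical", 1), ("developer", 1),
   ("sales", 2), ("business development", 2),
   ("marketing", 3), ("growth", 3), ("brand", 3),
   ("finance", 4), ("accounting", 4), ("cfo", 4)]

def pvDepartments : List String := ["Executive", "Engineering", "Sales", "Marketing", "Finance"]

def get_department_from_title_py_alt (job_title : String) : String :=
  let title_lower := PySem.Str.lower job_title
  -- min(..., default=None) over the ranks of the keywords occurring in title_lower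
  let best : Option Int := pvKeywordRank.foldl
    (fun acc kr =>
      if PySem.Str.isIn kr.1 title_lower then
        match acc with
        | none => some kr.2
        | some m => some (min m kr.2)
      else acc) none
  match best with
  | none => "Other"
  | some r => (PySem.List.pyGet? pvDepartments r).getD "Other"  -- _DEPARTMENTS[best]; r is always 0..4, the default is unreachable

-- ===== PRECONDITION & SPEC =====
def Spec_get_department_from_title_py (job_title : String) (out : String) : Prop := out = get_department_from_title_py_alt job_title
instance (job_title : String) (out : String) : Decidable (Spec_get_department_from_title_py job_title out) := by unfold Spec_get_department_from_title_py; infer_instance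

-- ===== CLAIM (what is proved, stated in full; the proofs are below) =====
def Claim_equal_get_department_from_title_py : Prop := ∀ (job_title : String), Dom_get_department_from_title_py job_title → Spec_get_department_from_title_py job_title (get_department_from_title_py job_title)

-- ===== LEMMAS AND PROOFS =====
-- B's fold is analysed group by group: over a block of keywords sharing one rank the
-- fold acts as a single conditional update (pvFold_group), so B reduces to a function of
-- the five group-match booleans, which is compared with A's if/elif chain by decide.

def pvUpd (acc : Option Int) (r : Int) : Option Int :=
  match acc with
  | none => some r
  | some m => some (min m r)

def pvStep (t : String) (acc : Option Int) (kr : String × Int) : Option Int :=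
  if PySem.Str.isIn kr.1 t then pvUpd acc kr.2 else acc

theorem pvUpd_idem (acc : Option Int) (r : Int) : pvUpd (pvUpd acc r) r = pvUpd acc r := by
  cases acc <;> simp [pvUpd]

theorem pvFold_eq (t : String) :
    List.foldl
      (fun (acc : Option Int) (kr : String × Int) =>
        if PySem.Str.isIn kr.1 t then
          match acc with
          | none => some kr.2
          | some m => some (min m kr.2)
        else acc) none pvKeywordRank
    = List.foldl (pvStep t) none pvKeywordRank := rfl

theorem pvFold_group (t : String) (r : Int) (kws : List String) (acc : Option Int) :
    List.foldl (pvStep t) acc (kws.map (fun k => (k, r)))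
      = if kws.any (fun k => PySem.Str.isIn k t) then pvUpd acc r else acc := by
  induction kws generalizing acc with
  | nil => simp
  | cons k kws ih =>
    simp only [List.map_cons, List.foldl_cons, List.any_cons, ih, pvStep]
    rcases Bool.dichotomy (PySem.Str.isIn k t) with h | h <;>
      rcases Bool.dichotomy (kws.any (fun k => PySem.Str.isIn k t)) with h' | h' <;>
        simp only [h, h'] <;> simp [pvUpd_idem]

theorem pvSplit :
    pvKeywordRank =
      (["ceo", "president", "founder"].map (fun k => (k, (0 : Int)))) ++
      ((["cto", "engineering", "technical", "developer"].map (fun k => (k, (1 : Int)))) ++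
      ((["sales", "business development"].map (fun k => (k, (2 : Int)))) ++
      ((["marketing", "growth", "brand"].map (fun k => (k, (3 : Int)))) ++
      (["finance", "accounting", "cfo"].map (fun k => (k, (4 : Int))))))) := rfl

-- ===== VERDICT (by name: the statement is the Claim_ definition above) =====
theorem get_department_from_title_py_spec : Claim_equal_get_department_from_title_py := by
  intro job_title _
  unfold Spec_get_department_from_title_py
  simp only [get_department_from_title_py, get_department_from_title_py_alt]
  rw [pvFold_eq, pvSplit, List.foldl_append, List.foldl_append, List.foldl_append,
    List.foldl_append, pvFold_group, pvFold_group, pvFold_group, pvFold_group, pvFold_group]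
  simp only [List.any_cons, List.any_nil]
  rcases Bool.dichotomy (PySem.Str.isIn "ceo" (PySem.Str.lower job_title) ||
      (PySem.Str.isIn "president" (PySem.Str.lower job_title) ||
        (PySem.Str.isIn "founder" (PySem.Str.lower job_title) || false))) with h1 | h1 <;>
    rcases Bool.dichotomy (PySem.Str.isIn "cto" (PySem.Str.lower job_title) ||
      (PySem.Str.isIn "engineering" (PySem.Str.lower job_title) ||
        (PySem.Str.isIn "technical" (PySem.Str.lower job_title) ||
          (PySem.Str.isIn "developer" (PySem.Str.lower job_title) || false)))) with h2 | h2 <;>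
    rcases Bool.dichotomy (PySem.Str.isIn "sales" (PySem.Str.lower job_title) ||
      (PySem.Str.isIn "business development" (PySem.Str.lower job_title) || false)) with h3 | h3 <;>
    rcases Bool.dichotomy (PySem.Str.isIn "marketing" (PySem.Str.lower job_title) ||
      (PySem.Str.isIn "growth" (PySem.Str.lower job_title) ||
        (PySem.Str.isIn "brand" (PySem.Str.lower job_title) || false))) with h4 | h4 <;>
    rcases Bool.dichotomy (PySem.Str.isIn "finance" (PySem.Str.lower job_title) ||
      (PySem.Str.isIn "accounting" (PySem.Str.lower job_title) ||
        (PySem.Str.isIn "cfo" (PySem.Str.lower job_title) || false))) with h5 | h5 <;>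
    simp only [h1, h2, h3, h4, h5] <;> decide
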